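-- pv_equiv track=rewrite | github.com/mikko-ahonen/usmtools | compliances/imports.py | get_docid_path
-- ===== SOURCE A (Python) =====
-- def get_docid_path(docid):
--     """
--     Return all docids
--     """
--     p = []
--     for d in docid.split('.'):
--         if len(p) > 0:
--             dd = p[-1] + '.' + d
--         else:
--             dd = d
--         p.append(dd)
--
--     return p
-- ===== SOURCE B (Python) =====
-- def get_docid_path(docid):
--     """
--     Return all docids
--     """
--     parts = docid.split('.')
--     return ['.'.join(parts[:i + 1]) for i in range(len(parts))]
-- ===== Notes on version B (the rewrite author's own statement) =====
-- stated objective: simpler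
-- what changed: B keeps no running accumulator: each cumulative path is rebuilt independently as '.'.join of a prefix slice over an index range, instead of extending the previous list element.
import Mathlib
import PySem

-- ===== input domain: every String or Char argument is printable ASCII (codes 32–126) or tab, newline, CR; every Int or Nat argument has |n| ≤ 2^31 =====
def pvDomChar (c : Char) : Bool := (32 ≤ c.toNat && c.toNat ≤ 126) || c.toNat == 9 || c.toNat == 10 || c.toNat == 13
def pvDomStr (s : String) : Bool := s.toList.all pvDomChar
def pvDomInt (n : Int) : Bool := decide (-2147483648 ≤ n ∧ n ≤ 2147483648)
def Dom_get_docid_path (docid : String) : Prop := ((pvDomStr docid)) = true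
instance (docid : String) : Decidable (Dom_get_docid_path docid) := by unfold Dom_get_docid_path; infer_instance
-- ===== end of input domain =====

-- B rebuilds each cumulative path independently as '.'.join of a prefix slice instead of
-- extending a running accumulator's last element: simpler decomposition, same cost.

-- ===== PORT A =====
-- A: p = []; for d in docid.split('.'): dd = p[-1] + '.' + d if len(p) > 0 else d; p.append(dd)
def get_docid_path (docid : String) : List String :=
  ((PySem.Str.split? docid ".").getD []).foldl
    (fun p d =>
      let dd := if p.length > 0 then ((PySem.List.pyGet? p (-1)).getD "") ++ "." ++ d else d
      p ++ [dd]) []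

-- ===== PORT B =====
-- B: parts = docid.split('.'); ['.'.join(parts[:i+1]) for i in range(len(parts))]
def get_docid_path_alt (docid : String) : List String :=
  let parts := (PySem.Str.split? docid ".").getD []
  (List.range parts.length).map (fun i => PySem.Str.join "." (parts.take (i + 1)))

-- ===== PRECONDITION & SPEC =====
def Spec_get_docid_path (docid : String) (out : List String) : Prop := out = get_docid_path_alt docid
instance (docid : String) (out : List String) : Decidable (Spec_get_docid_path docid out) := by unfold Spec_get_docid_path; infer_instance

-- ===== CLAIM (what is proved, stated in full; the proofs are below) =====
def Claim_equal_get_docid_path : Prop := ∀ (docid : String), Dom_get_docid_path docid → Spec_get_docid_path docid (get_docid_path docid)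

-- ===== LEMMAS AND PROOFS =====

-- common recursive characterisation of the cumulative-prefix paths
def pvPaths : List String → List String
  | [] => []
  | d :: ds => d :: (pvPaths ds).map (fun s => d ++ "." ++ s)

-- A's loop step
def pvStepA (p : List String) (d : String) : List String :=
  let dd := if p.length > 0 then ((PySem.List.pyGet? p (-1)).getD "") ++ "." ++ d else d
  p ++ [dd]

lemma foldA_inv (parts : List String) : ∀ (q : List String) (x : String),
    parts.foldl pvStepA (q ++ [x]) =
      q ++ [x] ++ (pvPaths parts).map (fun s => x ++ "." ++ s) := by
  induction parts with
  | nil => intro q x; simp [pvPaths]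
  | cons d ds ih =>
    intro q x
    have hstep : pvStepA (q ++ [x]) d = (q ++ [x]) ++ [x ++ "." ++ d] := by
      simp [pvStepA, PySem.List.pyGet?, PySem.List.pyIdx?]
    simp only [List.foldl_cons, hstep]
    rw [ih (q ++ [x]) (x ++ "." ++ d)]
    simp [pvPaths, List.map_map, Function.comp, String.append_assoc]

lemma foldA_eq_paths (parts : List String) :
    parts.foldl pvStepA [] = pvPaths parts := by
  cases parts with
  | nil => rfl
  | cons d ds =>
    have hstep : pvStepA [] d = [] ++ [d] := by simp [pvStepA]
    simp only [List.foldl_cons, hstep]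
    rw [foldA_inv ds [] d]
    simp [pvPaths]

lemma join_cons_of_ne_nil (d : String) (xs : List String) (h : xs ≠ []) :
    PySem.Str.join "." (d :: xs) = d ++ "." ++ PySem.Str.join "." xs := by
  cases xs with
  | nil => exact absurd rfl h
  | cons y ys =>
    apply String.toList_injective
    simp [PySem.Str.toList_join, PySem.Chars.join_cons_cons, String.toList_append]

lemma mapB_eq_paths (parts : List String) :
    (List.range parts.length).map (fun i => PySem.Str.join "." (parts.take (i + 1))) =
      pvPaths parts := by
  induction parts with
  | nil => rfl
  | cons d ds ih =>
    simp only [List.length_cons, List.range_succ_eq_map, List.map_cons, List.map_map]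
    have h0 : PySem.Str.join "." ((d :: ds).take 1) = d := by
      cases ds <;>
        (apply String.toList_injective;
         simp [PySem.Str.toList_join, PySem.Chars.join_singleton])
    rw [h0]
    have hrest : ∀ i ∈ List.range ds.length,
        ((fun i => PySem.Str.join "." ((d :: ds).take (i + 1))) ∘ Nat.succ) i =
          d ++ "." ++ PySem.Str.join "." (ds.take (i + 1)) := by
      intro i hi
      have hlen : i < ds.length := List.mem_range.mp hi
      have hne : ds.take (i + 1) ≠ [] := by
        cases ds with
        | nil => exact absurd hlen (by simp)
        | cons y ys => simp [List.take]
      simp only [Function.comp]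
      rw [show (d :: ds).take (i + 1 + 1) = d :: ds.take (i + 1) from rfl]
      exact join_cons_of_ne_nil d _ hne
    rw [List.map_congr_left hrest]
    simp only [pvPaths, List.cons.injEq, true_and]
    rw [← ih]
    simp [List.map_map, Function.comp]

-- ===== VERDICT (by name: the statement is the Claim_ definition above) =====
theorem get_docid_path_spec : Claim_equal_get_docid_path := by
  intro docid _
  unfold Spec_get_docid_path get_docid_path get_docid_path_alt
  rw [show (fun (p : List String) (d : String) =>
        let dd := if p.length > 0 then ((PySem.List.pyGet? p (-1)).getD "") ++ "." ++ d else d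
        p ++ [dd]) = pvStepA from rfl]
  rw [foldA_eq_paths, mapB_eq_paths]
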